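-- pv_equiv track=rewrite | github.com/BilalMir135/Network-Security | autoKeyCipher.py | convertTextIntoKey
-- ===== SOURCE A (Python) =====
-- def convertTextIntoKey (text, key):
--     newText = ''
--     keyCount = 0
--     plainTextCount = 0
--     for char in text:
--         if keyCount < len(key):
--             newText += key[keyCount]
--             keyCount += 1
--         else:
--             newText += text[plainTextCount]
--             plainTextCount +=1
--     return newText
-- ===== SOURCE B (Python) =====
-- def convertTextIntoKey(text, key):
--     return (key + text)[:len(text)]
-- ===== Notes on version B (the rewrite author's own statement) =====
-- stated objective: simpler
-- what changed: Replaces the character-by-character loop with two counters by the closed form (key + text)[:len(text)].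
import Mathlib
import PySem

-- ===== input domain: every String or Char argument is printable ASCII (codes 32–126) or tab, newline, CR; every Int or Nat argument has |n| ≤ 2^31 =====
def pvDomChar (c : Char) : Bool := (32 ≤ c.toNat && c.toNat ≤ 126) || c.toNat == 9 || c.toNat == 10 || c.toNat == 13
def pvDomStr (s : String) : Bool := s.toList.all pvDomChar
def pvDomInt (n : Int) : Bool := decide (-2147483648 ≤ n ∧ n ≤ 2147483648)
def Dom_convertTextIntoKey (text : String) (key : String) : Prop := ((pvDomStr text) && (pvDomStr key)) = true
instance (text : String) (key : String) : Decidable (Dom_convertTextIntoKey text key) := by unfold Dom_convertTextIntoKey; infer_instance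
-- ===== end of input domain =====

-- B replaces A's per-character loop with the closed form (key + text)[:len(text)]: simpler, same value.

-- ===== PORT A =====
-- literal port of A's loop: state = (newText, keyCount, plainTextCount); indices are always
-- in range on reachable states, so getD's default is never used.
def pvStepA (k t : List Char) (st : List Char × Nat × Nat) : List Char × Nat × Nat :=
  let (nt, kc, pc) := st
  if kc < k.length then (nt ++ [k.getD kc ' '], kc + 1, pc)
  else (nt ++ [t.getD pc ' '], kc, pc + 1)

def convertTextIntoKey (text : String) (key : String) : String :=
  let t := text.toList
  let k := key.toList
  (t.foldl (fun st _ => pvStepA k t st) ([], 0, 0)).1 |> String.ofList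

-- ===== PORT B =====
-- (key + text)[:len(text)]  — slice with a nonnegative upper bound is List.take
def convertTextIntoKey_alt (text : String) (key : String) : String :=
  String.ofList ((key.toList ++ text.toList).take text.toList.length)

-- ===== PRECONDITION & SPEC =====
def Spec_convertTextIntoKey (text : String) (key : String) (out : String) : Prop := out = convertTextIntoKey_alt text key
instance (text : String) (key : String) (out : String) : Decidable (Spec_convertTextIntoKey text key out) := by unfold Spec_convertTextIntoKey; infer_instance

-- ===== CLAIM (what is proved, stated in full; the proofs are below) =====
def Claim_equal_convertTextIntoKey : Prop := ∀ (text : String) (key : String), Dom_convertTextIntoKey text key → Spec_convertTextIntoKey text key (convertTextIntoKey text key)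

-- ===== LEMMAS AND PROOFS =====

-- Loop invariant: after i+l.length steps of A's loop (only the length of l matters),
-- the state is (first i+|l| chars of key++text, min (i+|l|) |key|, the rest).
lemma pvLoopA (k t : List Char) (l : List Char) (i : Nat)
    (h : i + l.length ≤ t.length) :
    l.foldl (fun st _ => pvStepA k t st)
      ((k ++ t).take i, min i k.length, i - min i k.length)
    = ((k ++ t).take (i + l.length), min (i + l.length) k.length,
        (i + l.length) - min (i + l.length) k.length) := by
  induction l generalizing i with
  | nil => simp
  | cons c cs ih =>
    have hi : i < t.length := by simp at h; omega
    have hstep : pvStepA k t ((k ++ t).take i, min i k.length, i - min i k.length)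
        = ((k ++ t).take (i + 1), min (i + 1) k.length, (i + 1) - min (i + 1) k.length) := by
      unfold pvStepA
      by_cases hk : i < k.length
      · have hmin : min i k.length = i := by omega
        rw [hmin]
        simp only [hk, if_pos]
        have hlt : i < (k ++ t).length := by simp; omega
        have : (k ++ t).take (i + 1) = (k ++ t).take i ++ [(k ++ t).getD i ' '] := by
          rw [List.take_add_one]
          simp [List.getD, List.getElem?_eq_getElem hlt]
        rw [this]
        have : (k ++ t).getD i ' ' = k.getD i ' ' := by
          simp [List.getD, List.getElem?_append_left hk]
        rw [this]
        have : min (i + 1) k.length = i + 1 := by omega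
        simp [this]
      · have hk' : k.length ≤ i := by omega
        have hmin : min i k.length = k.length := by omega
        rw [hmin]
        simp only [hk]
        have hlt : i < (k ++ t).length := by simp; omega
        have h1 : (k ++ t).take (i + 1) = (k ++ t).take i ++ [(k ++ t).getD i ' '] := by
          rw [List.take_add_one]
          simp [List.getD, List.getElem?_eq_getElem hlt]
        have h2 : (k ++ t).getD i ' ' = t.getD (i - k.length) ' ' := by
          simp [List.getD, List.getElem?_append_right hk']
        have h3 : min (i + 1) k.length = k.length := by omega
        rw [h1, h2, h3]
        have : i - k.length + 1 = i + 1 - k.length := by omega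
        simp [this]
    simp only [List.foldl_cons, hstep]
    have := ih (i + 1) (by simp at h ⊢; omega)
    simpa [Nat.add_assoc, Nat.add_comm 1 cs.length] using this

-- ===== VERDICT (by name: the statement is the Claim_ definition above) =====
theorem convertTextIntoKey_spec : Claim_equal_convertTextIntoKey := by
  intro text key _
  unfold Spec_convertTextIntoKey convertTextIntoKey convertTextIntoKey_alt
  have h := pvLoopA key.toList text.toList text.toList 0 (by simp)
  simp only [List.take_zero, Nat.zero_min, Nat.zero_add, Nat.sub_self] at h
  simp only [h]
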